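-- pv_equiv track=rewrite | github.com/cxy592394546/LeetCode_py | Code/Daily/2102/210220/demo0220_697.py | func
-- ===== SOURCE A (Python) =====
-- from typing import List
--
-- def func(nums: List[int]) -> int:
--     dic = {}
--     for i in range(len(nums)):
--         if nums[i] not in dic.keys():
--             dic[nums[i]] = [1, i, i]
--         else:
--             dic[nums[i]][0] += 1
--             dic[nums[i]][2] = i
--     ret = [0, 0]
--     for value in dic.values():
--         if value[0] == ret[0]:
--             ret[1] = min(ret[1], value[2] - value[1] + 1)
--         if value[0] > ret[0]:
--             ret[1] = value[2] - value[1] + 1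
--             ret[0] = value[0]
--     return ret[1]
-- ===== SOURCE B (Python) =====
-- from typing import List
--
-- def func(nums: List[int]) -> int:
--     if not nums:
--         return 0
--     vals = set(nums)
--     degree = max(nums.count(x) for x in vals)
--     best = len(nums)
--     for x in vals:
--         if nums.count(x) == degree:
--             first = nums.index(x)
--             last = len(nums) - 1 - nums[::-1].index(x)
--             best = min(best, last - first + 1)
--     return best
-- ===== Notes on version B (the rewrite author's own statement) =====
-- stated objective: simpler
-- what changed: A builds a value->[count,first,last] dict in one indexed pass and then scans the dict values for the max-count/min-span; B uses no dicts at all: it computes the degree directly with max over nums.count(x) for the distinct values, then for each value of that count recovers its span from nums.index and a reversed-list index, taking the minimum.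
import Mathlib
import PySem

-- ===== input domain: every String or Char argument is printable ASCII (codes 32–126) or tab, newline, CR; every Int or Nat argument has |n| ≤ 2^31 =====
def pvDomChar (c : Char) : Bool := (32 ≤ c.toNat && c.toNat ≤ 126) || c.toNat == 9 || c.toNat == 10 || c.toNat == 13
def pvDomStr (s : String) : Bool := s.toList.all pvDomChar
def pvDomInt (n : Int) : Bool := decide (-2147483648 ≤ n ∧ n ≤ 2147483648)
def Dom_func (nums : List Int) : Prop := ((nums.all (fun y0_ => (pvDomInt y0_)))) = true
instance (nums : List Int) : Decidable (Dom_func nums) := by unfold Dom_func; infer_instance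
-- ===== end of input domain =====

-- B drops A's value→[count,first,last] dict entirely: it finds the degree with max over
-- nums.count(x) on the distinct values and recovers each candidate's span from nums.index
-- and a reversed-list index; alternative decomposition, same return value.

-- ===== PORT A =====
-- body of A's first loop (index i; nums[i] is in range for every i of range(len(nums)), so pyGetD is exact here)
def funcBuild (nums : List Int) (dic : PySem.Dict Int (Int × Int × Int)) (i : Int) :
    PySem.Dict Int (Int × Int × Int) :=
  let x := PySem.List.pyGetD nums i 0
  if dic.contains x = false then dic.insert x (1, i, i)
  else dic.modify x (1, 0, 0) (fun t => (t.1 + 1, t.2.1, i))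

def funcScan (ret : Int × Int) (v : Int × Int × Int) : Int × Int :=
  let ret1 := if v.1 == ret.1 then (ret.1, min ret.2 (v.2.2 - v.2.1 + 1)) else ret
  if v.1 > ret1.1 then (v.1, v.2.2 - v.2.1 + 1) else ret1

def func (nums : List Int) : Int :=
  (((PySem.List.pyRange 0 (PySem.List.len nums) 1).foldl (funcBuild nums)
      PySem.Dict.empty).values.foldl funcScan ((0 : Int), (0 : Int))).2


-- ===== PORT B =====
def func_alt (nums : List Int) : Int :=
  if nums = [] then 0
  else
    let vals := PySem.Set.ofList nums
    let degree : Int :=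
      (PySem.List.max? (vals.map (fun x => (PySem.List.count nums x : Int))) (fun y => y)).getD 0
    vals.foldl (fun best x =>
      if ((PySem.List.count nums x : Int) == degree) then
        let first : Int := ((PySem.List.index? nums x).getD 0 : Nat)
        let rev := (PySem.List.slice? nums none none (-1)).getD []
        let last : Int := PySem.List.len nums - 1 - (((PySem.List.index? rev x).getD 0 : Nat) : Int)
        min best (last - first + 1)
      else best) (PySem.List.len nums)


-- ===== PRECONDITION & SPEC =====
def Spec_func (nums : List Int) (out : Int) : Prop := out = func_alt nums
instance (nums : List Int) (out : Int) : Decidable (Spec_func nums out) := by unfold Spec_func; infer_instance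

-- ===== CLAIM (what is proved, stated in full; the proofs are below) =====
def Claim_equal_func : Prop := ∀ (nums : List Int), Dom_func nums → Spec_func nums (func nums)

-- ===== LEMMAS AND PROOFS =====

-- A's first-loop body as a function of the (index, value) pair
def stepAxy (d : PySem.Dict Int (Int × Int × Int)) (p : Int × Int) :
    PySem.Dict Int (Int × Int × Int) :=
  if d.contains p.2 = false then d.insert p.2 (1, p.1, p.1)
  else d.modify p.2 (1, 0, 0) (fun t => (t.1 + 1, t.2.1, p.1))

-- the [count, first, last] triple A's dict ends up holding for a value x, expressed
-- through the primitives B uses (count, index? and a reversed index?)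
def summ (nums : List Int) (x : Int) : Int × Int × Int :=
  ((PySem.List.count nums x : Int),
   (((PySem.List.index? nums x).getD 0 : Nat) : Int),
   ((nums.length : Int)) - 1 - (((PySem.List.index? nums.reverse x).getD 0 : Nat) : Int))

lemma summ_append_of_ne (l : List Int) (x y : Int) (hy : y ∈ l) (hyx : y ≠ x) :
    summ (l ++ [x]) y = summ l y := by
  obtain ⟨r, hr⟩ := Option.isSome_iff_exists.mp
    ((PySem.List.index?_isSome_iff l.reverse y).mpr (List.mem_reverse.mpr hy))
  have hrev : (l ++ [x]).reverse = x :: l.reverse := by simp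
  rw [summ, summ, hrev, PySem.List.index?_cons_of_ne _ (Ne.symm hyx),
    PySem.List.index?_append_of_mem _ hy, hr]
  have hbx : (x == y) = false := by simp [Ne.symm hyx]
  simp only [PySem.List.count_eq, List.count_append, List.count_singleton, hbx,
    Option.map_some, Option.getD_some, List.length_append, List.length_singleton,
    Prod.mk.injEq]
  norm_num
  ring

lemma summ_append_self_of_mem (l : List Int) (x : Int) (hx : x ∈ l) :
    summ (l ++ [x]) x = ((summ l x).1 + 1, (summ l x).2.1, (l.length : Int)) := by
  have hrev : (l ++ [x]).reverse = x :: l.reverse := by simp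
  rw [summ, summ, hrev, PySem.List.index?_cons_self, PySem.List.index?_append_of_mem _ hx]
  simp only [PySem.List.count_eq, List.count_append, List.count_singleton, beq_self_eq_true,
    if_true, List.length_append, List.length_singleton, Option.getD_some, Nat.cast_zero,
    Prod.mk.injEq]
  norm_num

lemma summ_append_self_of_not_mem (l : List Int) (x : Int) (hx : x ∉ l) :
    summ (l ++ [x]) x = (1, (l.length : Int), (l.length : Int)) := by
  have hrev : (l ++ [x]).reverse = x :: l.reverse := by simp
  rw [summ, hrev, PySem.List.index?_cons_self,
    PySem.List.index?_append_singleton_self l x hx]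
  simp only [PySem.List.count_eq, List.count_append, List.count_singleton, beq_self_eq_true,
    if_true, List.count_eq_zero_of_not_mem hx, List.length_append, List.length_singleton,
    Option.getD_some, Nat.cast_zero, Prod.mk.injEq]
  norm_num


-- A's dict entry viewed as a (count, span) summary
def toSt (t : Int × Int × Int) : Int × Int := (t.1, t.2.2 - t.2.1 + 1)

-- the "keep max count, min span on ties" merge A's second loop performs, and the
-- two quantities B computes instead: the max count and the filtered-min-span fold
def comb (a t : Int × Int) : Int × Int :=
  if t.1 = a.1 then (a.1, min a.2 t.2) else if a.1 < t.1 then t else a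

def maxC (vs : List (Int × Int)) : Int := vs.foldl (fun a p => max a p.1) 0

def gsel (D b : Int) (p : Int × Int) : Int := if p.1 = D then min b p.2 else b

lemma maxC_append_singleton (vs : List (Int × Int)) (q : Int × Int) :
    maxC (vs ++ [q]) = max (maxC vs) q.1 := by
  simp [maxC, List.foldl_append]

lemma le_maxC (vs : List (Int × Int)) : ∀ p ∈ vs, p.1 ≤ maxC vs := by
  intro p hp
  have h := (PySem.List.le_foldl_max (vs.map Prod.fst) 0).2 p.1 (List.mem_map_of_mem hp)
  rwa [List.foldl_map] at h

lemma foldl_gsel_of_ne (D b : Int) (vs : List (Int × Int)) (h : ∀ p ∈ vs, p.1 ≠ D) :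
    vs.foldl (gsel D) b = b := by
  induction vs generalizing b with
  | nil => rfl
  | cons q t ih =>
    simp only [List.foldl_cons, gsel, if_neg (h q (by simp))]
    exact ih _ (fun p hp => h p (by simp [hp]))

lemma comb_vs_twophase (vs : List (Int × Int)) (b0 : Int) (hne : vs ≠ [])
    (h : ∀ p ∈ vs, 1 ≤ p.1 ∧ p.2 ≤ b0) :
    vs.foldl comb ((0 : Int), (0 : Int)) = (maxC vs, vs.foldl (gsel (maxC vs)) b0) := by
  induction vs using List.reverseRecOn with
  | nil => exact absurd rfl hne
  | append_singleton t q ih =>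
    have hq := h q (by simp)
    rcases List.eq_nil_or_concat' t with ht | ⟨t', q', ht⟩
    · subst ht
      simp only [List.nil_append, List.foldl_cons, List.foldl_nil, maxC, gsel, comb]
      have h1 : ¬ (q.1 = 0) := by omega
      have hmax : max (0:Int) q.1 = q.1 := by omega
      rw [if_neg h1, if_pos (by omega : (0:Int) < q.1), hmax, if_pos rfl]
      have hmin : min b0 q.2 = q.2 := by omega
      rw [hmin]
    · have htne : t ≠ [] := by subst ht; simp
      have ih' := ih htne (fun p hp => h p (List.mem_append_left _ hp))
      rw [List.foldl_append, List.foldl_cons, List.foldl_nil, ih',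
        maxC_append_singleton]
      have hM1 : 1 ≤ maxC t := by
        obtain ⟨p0, hp0⟩ := List.exists_mem_of_ne_nil t htne
        exact le_trans (h p0 (List.mem_append_left _ hp0)).1 (le_maxC t p0 hp0)
      rcases lt_trichotomy q.1 (maxC t) with hlt | heq | hgt
      · have hmax : max (maxC t) q.1 = maxC t := by omega
        rw [hmax, comb, if_neg (by omega), if_neg (by omega),
          List.foldl_append, List.foldl_cons, List.foldl_nil, gsel,
          if_neg (by omega)]
      · have hmax : max (maxC t) q.1 = maxC t := by omega
        rw [hmax, comb, if_pos heq,
          List.foldl_append, List.foldl_cons, List.foldl_nil, gsel, if_pos heq]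
      · have hmax : max (maxC t) q.1 = q.1 := by omega
        rw [hmax, comb, if_neg (by omega), if_pos (by omega),
          List.foldl_append, List.foldl_cons, List.foldl_nil,
          foldl_gsel_of_ne _ _ _ (fun p hp => by have := le_maxC t p hp; omega),
          gsel, if_pos rfl]
        have : min b0 q.2 = q.2 := by omega
        simp [this]

lemma funcScan_eq (ret : Int × Int) (v : Int × Int × Int) :
    funcScan ret v = comb ret (toSt v) := by
  rcases ret with ⟨d, r⟩
  simp only [funcScan, comb, toSt, beq_iff_eq, gt_iff_lt]
  split_ifs <;> simp only [Prod.mk.injEq] <;> (try dsimp only at *) <;> omega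


-- the dict built by A's first loop holds exactly B's per-distinct-value summaries
lemma build_items (nums : List Int) :
    ((PySem.List.enumerate nums 0).foldl stepAxy PySem.Dict.empty).items
      = (PySem.Set.ofList nums).map (fun x => (x, summ nums x)) := by
  induction nums using List.reverseRecOn with
  | nil => rfl
  | append_singleton l x ih =>
    rw [PySem.List.enumerate_append, List.foldl_append]
    set d := (PySem.List.enumerate l 0).foldl stepAxy PySem.Dict.empty with hd
    have hkeys : d.keys = PySem.Set.ofList l := by
      simp only [PySem.Dict.keys, ih, List.map_map]
      exact List.map_id _
    have hnd : d.keys.Nodup := by rw [hkeys]; exact PySem.Set.nodup_ofList l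
    simp only [PySem.List.enumerate_cons, PySem.List.enumerate_nil, List.foldl_cons,
      List.foldl_nil]
    by_cases hx : x ∈ l
    · have hc : d.contains x = true := by
        rw [PySem.Dict.contains_eq_decide_mem_keys, hkeys]
        simp [PySem.Set.mem_ofList, hx]
      have hmem : (x, summ l x) ∈ d.items := by
        rw [ih]; exact List.mem_map_of_mem ((PySem.Set.mem_ofList l x).mpr hx)
      have hgd : d.getD x (1, 0, 0) = summ l x :=
        PySem.Dict.getD_of_mem_items d hmem hnd _
      have hstep : stepAxy d (0 + (l.length : Int), x)
          = d.insert x ((summ l x).1 + 1, (summ l x).2.1, (l.length : Int)) := by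
        simp only [stepAxy, hc, PySem.Dict.modify, hgd]
        norm_num
      rw [hstep, PySem.Dict.items_insert_of_contains d _ hc, ih, List.map_map,
        PySem.Set.ofList_append_singleton, PySem.Set.add_of_mem ((PySem.Set.mem_ofList l x).mpr hx)]
      refine List.map_congr_left (fun y hy => ?_)
      have hyl : y ∈ l := (PySem.Set.mem_ofList l y).mp hy
      by_cases hyx : y = x
      · subst hyx
        simp only [Function.comp_apply, beq_self_eq_true, if_true,
          summ_append_self_of_mem l y hyl]
      · have hb : (y == x) = false := by simp [hyx]
        simp only [Function.comp_apply, hb, summ_append_of_ne l x y hyl hyx]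
        norm_num
    · have hc : d.contains x = false := by
        rw [PySem.Dict.contains_eq_decide_mem_keys, hkeys]
        simp [PySem.Set.mem_ofList, hx]
      have hstep : stepAxy d (0 + (l.length : Int), x)
          = d.insert x (1, (l.length : Int), (l.length : Int)) := by
        simp only [stepAxy, hc]
        norm_num
      rw [hstep, PySem.Dict.items_insert_of_not_contains d _ hc, ih,
        PySem.Set.ofList_append_singleton,
        PySem.Set.add_of_not_mem (fun h => hx ((PySem.Set.mem_ofList l x).mp h)),
        List.map_append]
      congr 1
      · refine List.map_congr_left (fun y hy => ?_)
        have hyl : y ∈ l := (PySem.Set.mem_ofList l y).mp hy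
        rw [summ_append_of_ne l x y hyl (fun h => hx (h ▸ hyl))]
      · simp [summ_append_self_of_not_mem l x hx]

-- ===== VERDICT (by name: the statement is the Claim_ definition above) =====
theorem func_spec : Claim_equal_func := by
  intro nums _
  show func nums = func_alt nums
  by_cases hne : nums = []
  · subst hne; rfl
  · have hbuild : (PySem.List.pyRange 0 (PySem.List.len nums) 1).foldl (funcBuild nums)
        PySem.Dict.empty = (PySem.List.enumerate nums 0).foldl stepAxy PySem.Dict.empty := by
      rw [PySem.List.enumerate_eq_map_pyRange nums 0, List.foldl_map]
      rfl
    set D := PySem.Set.ofList nums with hD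
    set pairs := D.map (fun x => toSt (summ nums x)) with hpairs
    -- A's result is the running merge over the (count, span) summaries
    have hA : func nums = (pairs.foldl comb ((0:Int),(0:Int))).2 := by
      rw [func, hbuild]
      have hv : ((PySem.List.enumerate nums 0).foldl stepAxy PySem.Dict.empty).values
          = D.map (fun x => summ nums x) := by
        simp only [PySem.Dict.values, build_items, List.map_map]
        rfl
      rw [hv, hpairs, List.foldl_map, List.foldl_map]
      simp only [funcScan_eq]
    -- side conditions for the two-phase lemma
    obtain ⟨y0, hy0⟩ := List.exists_mem_of_ne_nil nums hne
    have hDne : D ≠ [] := by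
      intro hnil
      have : y0 ∈ D := (PySem.Set.mem_ofList nums y0).mpr hy0
      rw [hnil] at this; exact absurd this (List.not_mem_nil)
    have hpne : pairs ≠ [] := by
      rw [hpairs]; exact fun hnil => hDne (List.map_eq_nil_iff.mp hnil)
    have hb : ∀ p ∈ pairs, 1 ≤ p.1 ∧ p.2 ≤ (nums.length : Int) := by
      intro p hp
      obtain ⟨x, hx, rfl⟩ := List.mem_map.mp hp
      have hxn : x ∈ nums := (PySem.Set.mem_ofList nums x).mp hx
      constructor
      · simp only [toSt, summ, PySem.List.count_eq]
        exact_mod_cast List.count_pos_iff.mpr hxn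
      · simp only [toSt, summ]
        omega
    have hmain := comb_vs_twophase pairs (nums.length : Int) hpne hb
    -- B's degree is the max of the counts
    obtain ⟨v0, vt, hDv⟩ : ∃ v0 vt, D = v0 :: vt := by
      cases hc : D with
      | nil => exact absurd hc hDne
      | cons a b => exact ⟨a, b, rfl⟩
    have hdeg : (PySem.List.max? (D.map (fun x => (PySem.List.count nums x : Int)))
        (fun y => y)).getD 0 = maxC pairs := by
      have hfst : ∀ x : Int, (toSt (summ nums x)).1 = (PySem.List.count nums x : Int) :=
        fun _ => rfl
      rw [maxC, hpairs, hDv]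
      simp only [List.map_cons, PySem.List.max?_id_cons, Option.getD_some, List.foldl_map,
        List.foldl_cons, hfst]
      have hv0 : v0 ∈ nums := (PySem.Set.mem_ofList nums v0).mp (by rw [← hD, hDv]; simp)
      have h0 : 0 < List.count v0 nums := List.count_pos_iff.mpr hv0
      have hm : max (0:Int) (PySem.List.count nums v0 : Int)
          = (PySem.List.count nums v0 : Int) := by
        simp only [PySem.List.count_eq]; omega
      rw [hm]
    -- B's fold is the filtered-min fold
    have hB : func_alt nums = pairs.foldl (gsel (maxC pairs)) ((nums.length : Int)) := by
      rw [func_alt, if_neg hne]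
      simp only [← hD, hdeg, PySem.List.slice?_none_none_neg_one, Option.getD_some]
      rw [hpairs, List.foldl_map]
      have hlen : PySem.List.len nums = (nums.length : Int) := rfl
      rw [hlen]
      congr 1
      funext best x
      simp only [gsel, toSt, summ, beq_iff_eq]
    rw [hA, hB, hmain]
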